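-- pv_equiv track=rewrite | github.com/misken/hillmaker | bydatetime.py | update_occ_incs
-- ===== SOURCE A (Python) =====
-- def update_occ_incs(in_bins, out_bins, list_of_inc_arrays, rec_types, num_bins):
--     num_stop_recs = len(in_bins)
--     rectype_counts = {}
--
--     for i in range(num_stop_recs):
--         if rec_types[i] == 'inner':
--             rectype_counts['inner'] = rectype_counts.get('inner', 0) + 1
--         elif rec_types[i] == 'left':
--             # arrival is outside analysis window (in_bin < 0)
--             rectype_counts['left'] = rectype_counts.get('left', 0) + 1
--             new_in_bin = 0
--             bin_shift = -1 * in_bins[i]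
--             new_inc_array = list_of_inc_arrays[i][bin_shift:]
--             # Update main arrays
--             in_bins[i] = new_in_bin
--             list_of_inc_arrays[i] = new_inc_array
--         elif rec_types[i] == 'right':
--             # departure is outside analysis window (out_bin >= num_bins)
--             rectype_counts['right'] = rectype_counts.get('right', 0) + 1
--             new_out_bin = num_bins - 1
--             bin_shift = out_bins[i] - (num_bins - 1)
--             # Keep all but the last bin_shift elements
--             new_inc_array = list_of_inc_arrays[i][:-bin_shift]
--             # Update main arrays
--             out_bins[i] = new_out_bin
--             list_of_inc_arrays[i] = new_inc_array
--         elif rec_types[i] == 'outer':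
--             # This is combo of left and right
--             rectype_counts['outer'] = rectype_counts.get('outer', 0) + 1
--             new_in_bin = 0
--             new_out_bin = num_bins - 1
--             entry_bin_shift = -1 * in_bins[i]
--             exit_bin_shift = out_bins[i] - (num_bins - 1)
--             new_inc_array = list_of_inc_arrays[i][entry_bin_shift:-exit_bin_shift]
--             # Update main arrays
--             in_bins[i] = new_in_bin
--             out_bins[i] = new_out_bin
--             list_of_inc_arrays[i] = new_inc_array
--         elif rec_types[i] == 'backwards':
--             rectype_counts['backwards'] = rectype_counts.get('backwards', 0) + 1
--         elif rec_types[i] == 'none':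
--             rectype_counts['none'] = rectype_counts.get('none', 0) + 1
--         else:
--             rectype_counts['unknown'] = rectype_counts.get('unknown', 0) + 1
--
--     return rectype_counts
-- ===== SOURCE B (Python) =====
-- def update_occ_incs(in_bins, out_bins, list_of_inc_arrays, rec_types, num_bins):
--     n = len(in_bins)
--
--     # Pass 1: count record types, folding anything unrecognized into 'unknown'.
--     known = {'inner', 'left', 'right', 'outer', 'backwards', 'none'}
--     labels = [t if t in known else 'unknown' for t in rec_types[:n]]
--     rectype_counts = {lab: labels.count(lab) for lab in dict.fromkeys(labels)}
--
--     # Pass 2: trim the occupancy arrays in place for records that straddle the window.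
--     for i in range(n):
--         t = rec_types[i]
--         if t == 'left':
--             list_of_inc_arrays[i] = list_of_inc_arrays[i][-in_bins[i]:]
--             in_bins[i] = 0
--         elif t == 'right':
--             list_of_inc_arrays[i] = list_of_inc_arrays[i][:-(out_bins[i] - (num_bins - 1))]
--             out_bins[i] = num_bins - 1
--         elif t == 'outer':
--             list_of_inc_arrays[i] = list_of_inc_arrays[i][-in_bins[i]:-(out_bins[i] - (num_bins - 1))]
--             in_bins[i] = 0
--             out_bins[i] = num_bins - 1
--
--     return rectype_counts
-- ===== Notes on version B (the rewrite author's own statement) =====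
-- stated objective: simpler
-- what changed: B splits A's single 7-branch loop into a counting pass (map each record type to itself-or-'unknown', then a dict comprehension over dict.fromkeys with list.count) and a separate in-place trimming pass for left/right/outer records only.
import Mathlib
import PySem

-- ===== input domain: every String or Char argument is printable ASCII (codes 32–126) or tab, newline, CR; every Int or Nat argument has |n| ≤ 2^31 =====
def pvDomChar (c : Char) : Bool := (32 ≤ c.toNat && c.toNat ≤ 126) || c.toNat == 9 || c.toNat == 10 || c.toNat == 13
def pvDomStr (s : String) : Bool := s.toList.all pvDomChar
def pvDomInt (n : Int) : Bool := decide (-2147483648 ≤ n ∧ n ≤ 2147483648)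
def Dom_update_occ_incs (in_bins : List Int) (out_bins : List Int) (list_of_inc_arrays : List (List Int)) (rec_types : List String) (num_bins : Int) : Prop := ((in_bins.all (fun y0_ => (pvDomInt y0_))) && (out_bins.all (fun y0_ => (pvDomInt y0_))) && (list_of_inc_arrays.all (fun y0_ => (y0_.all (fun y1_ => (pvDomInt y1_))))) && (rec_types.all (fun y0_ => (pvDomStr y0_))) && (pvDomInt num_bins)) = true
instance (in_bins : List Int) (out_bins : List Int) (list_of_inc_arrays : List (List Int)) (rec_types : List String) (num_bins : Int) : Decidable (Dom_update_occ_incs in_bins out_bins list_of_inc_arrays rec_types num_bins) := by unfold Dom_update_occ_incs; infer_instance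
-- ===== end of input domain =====

-- B replaces A's single loop (which interleaves counting and in-place trimming) by a counting
-- pass over mapped labels (dict.fromkeys + count) plus a separate trimming pass; A mutates
-- in_bins/out_bins/list_of_inc_arrays in place, B performs the same mutations, and the
-- equivalence proved here is about the RETURN value (the rectype counts dict) only.


-- ===== PORT A =====
-- Loop state: the three (mutated-in-place) arrays plus the rectype_counts dict.
def updStepA (rec_types : List String) (num_bins : Int)
    (st : List Int × List Int × List (List Int) × PySem.Dict String Int) (i : Nat) :
    List Int × List Int × List (List Int) × PySem.Dict String Int :=
  let inb := st.1; let outb := st.2.1; let arrs := st.2.2.1; let cnt := st.2.2.2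
  let t := rec_types.getD i ""
  if t = "inner" then
    (inb, outb, arrs, cnt.insert "inner" (cnt.getD "inner" 0 + 1))
  else if t = "left" then
    let cnt := cnt.insert "left" (cnt.getD "left" 0 + 1)
    let new_in_bin : Int := 0
    let bin_shift : Int := -1 * inb.getD i 0
    let new_inc_array := PySem.List.slice (arrs.getD i []) (some bin_shift) none
    (inb.set i new_in_bin, outb, arrs.set i new_inc_array, cnt)
  else if t = "right" then
    let cnt := cnt.insert "right" (cnt.getD "right" 0 + 1)
    let new_out_bin : Int := num_bins - 1
    let bin_shift : Int := outb.getD i 0 - (num_bins - 1)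
    let new_inc_array := PySem.List.slice (arrs.getD i []) none (some (-bin_shift))
    (inb, outb.set i new_out_bin, arrs.set i new_inc_array, cnt)
  else if t = "outer" then
    let cnt := cnt.insert "outer" (cnt.getD "outer" 0 + 1)
    let new_in_bin : Int := 0
    let new_out_bin : Int := num_bins - 1
    let entry_bin_shift : Int := -1 * inb.getD i 0
    let exit_bin_shift : Int := outb.getD i 0 - (num_bins - 1)
    let new_inc_array := PySem.List.slice (arrs.getD i []) (some entry_bin_shift) (some (-exit_bin_shift))
    (inb.set i new_in_bin, outb.set i new_out_bin, arrs.set i new_inc_array, cnt)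
  else if t = "backwards" then
    (inb, outb, arrs, cnt.insert "backwards" (cnt.getD "backwards" 0 + 1))
  else if t = "none" then
    (inb, outb, arrs, cnt.insert "none" (cnt.getD "none" 0 + 1))
  else
    (inb, outb, arrs, cnt.insert "unknown" (cnt.getD "unknown" 0 + 1))

def update_occ_incs (in_bins : List Int) (out_bins : List Int) (list_of_inc_arrays : List (List Int)) (rec_types : List String) (num_bins : Int) : List (String × Int) :=
  let num_stop_recs := in_bins.length
  let final := (List.range num_stop_recs).foldl (updStepA rec_types num_bins)
    (in_bins, out_bins, list_of_inc_arrays, PySem.Dict.empty)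
  final.2.2.2.items

-- ===== PORT B =====
-- 't in known' for the 6-element set literal of known record types
def knownLabel (t : String) : Bool :=
  t = "inner" || t = "left" || t = "right" || t = "outer" || t = "backwards" || t = "none"

-- Return-value port of B: the counting pass. B's second pass only mutates the three array
-- arguments in place (same slices as A) and does not touch the returned dict, so the pure
-- return-value port omits it.
def update_occ_incs_alt (in_bins : List Int) (out_bins : List Int) (list_of_inc_arrays : List (List Int)) (rec_types : List String) (num_bins : Int) : List (String × Int) :=
  let labels := (rec_types.take in_bins.length).map (fun t => if knownLabel t then t else "unknown")
  (PySem.List.dedup labels).map (fun lab => (lab, (labels.count lab : Int)))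

-- ===== PRECONDITION & SPEC =====
-- Exactly the inputs on which Python A returns: for every processed index i the loop reads
-- rec_types[i]; 'left'/'right'/'outer' records also read list_of_inc_arrays[i], and
-- 'right'/'outer' also read out_bins[i] — anything else raises IndexError.
def Pre_update_occ_incs (in_bins : List Int) (out_bins : List Int) (list_of_inc_arrays : List (List Int)) (rec_types : List String) (num_bins : Int) : Prop :=
  ∀ i : Nat, i < in_bins.length →
    i < rec_types.length ∧
    ((rec_types.getD i "" = "left" ∨ rec_types.getD i "" = "right" ∨ rec_types.getD i "" = "outer") → i < list_of_inc_arrays.length) ∧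
    ((rec_types.getD i "" = "right" ∨ rec_types.getD i "" = "outer") → i < out_bins.length)
instance (in_bins : List Int) (out_bins : List Int) (list_of_inc_arrays : List (List Int)) (rec_types : List String) (num_bins : Int) : Decidable (Pre_update_occ_incs in_bins out_bins list_of_inc_arrays rec_types num_bins) := by unfold Pre_update_occ_incs; infer_instance

def pvWitness_update_occ_incs : List Int × List Int × List (List Int) × List String × Int :=
  ([-1, 2], [1, 3], [[1, 1, 1], [2, 2]], ["left", "weird"], 3)

def Spec_update_occ_incs (in_bins : List Int) (out_bins : List Int) (list_of_inc_arrays : List (List Int)) (rec_types : List String) (num_bins : Int) (out : List (String × Int)) : Prop := out = update_occ_incs_alt in_bins out_bins list_of_inc_arrays rec_types num_bins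
instance (in_bins : List Int) (out_bins : List Int) (list_of_inc_arrays : List (List Int)) (rec_types : List String) (num_bins : Int) (out : List (String × Int)) : Decidable (Spec_update_occ_incs in_bins out_bins list_of_inc_arrays rec_types num_bins out) := by unfold Spec_update_occ_incs; infer_instance

-- ===== CLAIM (what is proved, stated in full; the proofs are below) =====
def Claim_equal_update_occ_incs : Prop := ∀ (in_bins : List Int) (out_bins : List Int) (list_of_inc_arrays : List (List Int)) (rec_types : List String) (num_bins : Int), Dom_update_occ_incs in_bins out_bins list_of_inc_arrays rec_types num_bins → Pre_update_occ_incs in_bins out_bins list_of_inc_arrays rec_types num_bins → Spec_update_occ_incs in_bins out_bins list_of_inc_arrays rec_types num_bins (update_occ_incs in_bins out_bins list_of_inc_arrays rec_types num_bins)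

-- ===== LEMMAS AND PROOFS =====

-- The counts component of A's loop ignores the array components of the state: it is the
-- plain tally (insert lab (getD lab 0 + 1)) of the mapped label of rec_types[i].
lemma countsA (rec_types : List String) (num_bins : Int) :
    ∀ (l : List Nat) (st : List Int × List Int × List (List Int) × PySem.Dict String Int),
      (l.foldl (updStepA rec_types num_bins) st).2.2.2 =
      l.foldl (fun c i =>
        let lab := if knownLabel (rec_types.getD i "") then rec_types.getD i "" else "unknown"
        c.insert lab (c.getD lab 0 + 1)) st.2.2.2 := by
  intro l
  induction l with
  | nil => intro st; rfl
  | cons i l ih =>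
    intro st
    simp only [List.foldl_cons]
    rw [ih]
    congr 1
    unfold updStepA knownLabel
    by_cases h1 : rec_types[i]?.getD "" = "inner"
    · simp [h1]
    · by_cases h2 : rec_types[i]?.getD "" = "left"
      · simp [h2]
      · by_cases h3 : rec_types[i]?.getD "" = "right"
        · simp [h3]
        · by_cases h4 : rec_types[i]?.getD "" = "outer"
          · simp [h4]
          · by_cases h5 : rec_types[i]?.getD "" = "backwards"
            · simp [h5]
            · by_cases h6 : rec_types[i]?.getD "" = "none"
              · simp [h6]
              · simp [h1, h2, h3, h4, h5, h6]

lemma range_map_getD (rec_types : List String) (n : Nat) (h : n ≤ rec_types.length) :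
    (List.range n).map (fun i => rec_types.getD i "") = rec_types.take n := by
  apply List.ext_getElem
  · simp [Nat.min_eq_left h]
  · intro i h1 h2
    simp only [List.getElem_map, List.getElem_range, List.getElem_take]
    have hi : i < rec_types.length := lt_of_lt_of_le (by simpa using h1) h
    simp [List.getD_eq_getElem?_getD, List.getElem?_eq_getElem hi]

-- ===== VERDICT (by name: the statement is the Claim_ definition above) =====
theorem update_occ_incs_spec : Claim_equal_update_occ_incs := by
  intro in_bins out_bins arrs rec_types num_bins _hdom hpre
  unfold Spec_update_occ_incs update_occ_incs update_occ_incs_alt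
  dsimp only
  have hn : in_bins.length ≤ rec_types.length := by
    rcases Nat.eq_zero_or_pos in_bins.length with h0 | h0
    · omega
    · by_contra hlt
      exact absurd (hpre rec_types.length (by omega)).1 (by omega)
  rw [countsA]
  have e1 : (List.range in_bins.length).foldl
      (fun (c : PySem.Dict String Int) i =>
        let lab := if knownLabel (rec_types.getD i "") then rec_types.getD i "" else "unknown"
        c.insert lab (c.getD lab 0 + 1)) PySem.Dict.empty
    = ((List.range in_bins.length).map (fun i => rec_types.getD i "")).foldl
      (fun (c : PySem.Dict String Int) t =>
        let lab := if knownLabel t then t else "unknown"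
        c.insert lab (c.getD lab 0 + 1)) PySem.Dict.empty := by rw [List.foldl_map]
  rw [e1, range_map_getD rec_types in_bins.length hn]
  have e2 : (rec_types.take in_bins.length).foldl
      (fun (c : PySem.Dict String Int) t =>
        let lab := if knownLabel t then t else "unknown"
        c.insert lab (c.getD lab 0 + 1)) PySem.Dict.empty
    = ((rec_types.take in_bins.length).map (fun t => if knownLabel t then t else "unknown")).foldl
      (fun (c : PySem.Dict String Int) lab =>
        c.insert lab (c.getD lab 0 + 1)) PySem.Dict.empty := by rw [List.foldl_map]
  rw [e2, PySem.Dict.foldl_insert_getD_add_one_eq_counter, PySem.Dict.items_counter]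
  simp [PySem.List.dedup_eq_ofList]
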